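-- pv_equiv track=rewrite | github.com/adeshpande03/Leetcode-Submissions | 2505-bitwise-or-of-all-subsequence-sums/2505-bitwise-or-of-all-subsequence-sums.py | subsequenceSumOr
-- ===== SOURCE A (Python) =====
-- def subsequenceSumOr(nums: list[int]) -> int:
--     or_ = 0
--     for bit in range(60):
--         sum_, tail = 0, (1 << (bit + 1)) - 1
--         for num in nums:
--             sum_ += num & tail
--         if sum_ >= 1 << bit:
--             or_ |= 1 << bit
--     return or_
-- ===== SOURCE B (Python) =====
-- def subsequenceSumOr(nums: list[int]) -> int:
--     # One pass per bit over nums builds a 60-entry bit-count table; a single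
--     # prefix sweep over the bits then reconstructs A's masked sums incrementally.
--     cnt = [sum((num >> j) & 1 for num in nums) for j in range(60)]
--     or_ = 0
--     running = 0
--     for bit in range(60):
--         running += cnt[bit] << bit
--         if running >= 1 << bit:
--             or_ |= 1 << bit
--     return or_
-- ===== Notes on version B (the rewrite author's own statement) =====
-- stated objective: alternative
-- what changed: Instead of recomputing a fresh masked sum of nums for each of the 60 bits, B builds a 60-entry table of per-bit set-bit counts in one pass structure and reconstructs each masked sum incrementally with a running prefix total over the bits.
import Mathlib
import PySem

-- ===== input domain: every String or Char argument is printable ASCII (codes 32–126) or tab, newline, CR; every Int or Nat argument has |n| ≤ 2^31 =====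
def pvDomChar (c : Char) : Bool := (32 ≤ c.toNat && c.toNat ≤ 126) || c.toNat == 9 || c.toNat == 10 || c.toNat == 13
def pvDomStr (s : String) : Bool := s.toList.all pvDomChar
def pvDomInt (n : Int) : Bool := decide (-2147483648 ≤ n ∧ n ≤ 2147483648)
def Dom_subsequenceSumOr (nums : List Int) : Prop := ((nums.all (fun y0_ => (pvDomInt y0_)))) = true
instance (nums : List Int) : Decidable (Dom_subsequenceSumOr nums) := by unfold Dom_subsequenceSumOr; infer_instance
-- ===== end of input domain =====

-- B replaces A's 60 fresh masked-sum rescans of nums by a per-bit population-count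
-- table plus one incremental prefix sweep over the 60 bits (alternative decomposition,
-- same asymptotic cost).

-- ===== PORT A =====
def subsequenceSumOr (nums : List Int) : Int :=
  (List.range 60).foldl (fun or_ bit =>
    let tail : Int := ((1 : Int) <<< (bit + 1)) - 1
    let sum_ : Int := nums.foldl (fun s num => s + PySem.Int.band num tail) 0
    if sum_ ≥ ((1 : Int) <<< bit) then PySem.Int.bor or_ ((1 : Int) <<< bit) else or_) 0

-- ===== PORT B =====
def subsequenceSumOr_alt (nums : List Int) : Int :=
  let cnt : List Int :=
    (List.range 60).map (fun j => nums.foldl (fun s num => s + PySem.Int.band (num >>> j) 1) 0)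
  ((List.range 60).foldl (fun (p : Int × Int) bit =>
      let running : Int := p.2 + (cnt.getD bit 0 <<< bit)
      (if running ≥ ((1 : Int) <<< bit) then PySem.Int.bor p.1 ((1 : Int) <<< bit) else p.1,
       running)) ((0 : Int), (0 : Int))).1

-- ===== PRECONDITION & SPEC =====
def Spec_subsequenceSumOr (nums : List Int) (out : Int) : Prop := out = subsequenceSumOr_alt nums
instance (nums : List Int) (out : Int) : Decidable (Spec_subsequenceSumOr nums out) := by unfold Spec_subsequenceSumOr; infer_instance

-- ===== CLAIM (what is proved, stated in full; the proofs are below) =====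
def Claim_equal_subsequenceSumOr : Prop := ∀ (nums : List Int), Dom_subsequenceSumOr nums → Spec_subsequenceSumOr nums (subsequenceSumOr nums)

-- ===== LEMMAS AND PROOFS =====

-- A's loop body, named (definitionally equal to the port's body).
def stepA (nums : List Int) (or_ : Int) (bit : Nat) : Int :=
  if nums.foldl (fun s num => s + PySem.Int.band num (((1 : Int) <<< (bit + 1)) - 1)) 0
      ≥ ((1 : Int) <<< bit)
  then PySem.Int.bor or_ ((1 : Int) <<< bit) else or_

-- B's bit-count table and loop body, named.
def cntList (nums : List Int) : List Int :=
  (List.range 60).map (fun j => nums.foldl (fun s num => s + PySem.Int.band (num >>> j) 1) 0)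

def stepB (nums : List Int) (p : Int × Int) (bit : Nat) : Int × Int :=
  (if p.2 + ((cntList nums).getD bit 0 <<< bit) ≥ ((1 : Int) <<< bit)
     then PySem.Int.bor p.1 ((1 : Int) <<< bit) else p.1,
   p.2 + ((cntList nums).getD bit 0 <<< bit))

-- the masked sum A recomputes at bit b (mask 2^(b+1)-1, written with exponent k := b+1)
def Ssum (nums : List Int) (k : Nat) : Int :=
  (nums.map (fun n => PySem.Int.band n ((2 : Int) ^ k - 1))).sum

theorem foldl_add_eq (f : Int → Int) (l : List Int) (c : Int) :
    l.foldl (fun s n => s + f n) c = c + (l.map f).sum := by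
  induction l generalizing c with
  | nil => simp
  | cons x xs ih => simp [ih, add_assoc]

theorem band_two_pow (n : Int) (k : Nat) :
    PySem.Int.band n ((2 : Int) ^ k - 1) = n % ((2 : Int) ^ k) := by
  have hcast : ((2 : Int) ^ k) = ((2 ^ k : Nat) : Int) := by push_cast; ring
  have hp : (0 : Int) < 2 ^ k := by positivity
  have e : ((2 : Int) ^ k - 1).toNat = 2 ^ k - 1 := by omega
  unfold PySem.Int.band
  by_cases hn : 0 ≤ n
  · rw [if_pos hn, if_pos (by omega)]
    rw [e, Nat.and_two_pow_sub_one_eq_mod, hcast]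
    push_cast
    rw [Int.toNat_of_nonneg hn]
  · rw [if_neg hn, if_pos (by omega)]
    set a : Nat := (-n - 1).toNat with ha
    have han : (a : Int) = -n - 1 := by omega
    rw [e, Nat.and_comm, Nat.and_two_pow_sub_one_eq_mod]
    have hlt : a % 2 ^ k < 2 ^ k := Nat.mod_lt _ (by positivity)
    have hmodcast : ((a % 2 ^ k : Nat) : Int) = (a : Int) % ((2 : Int) ^ k) := by
      rw [hcast]; push_cast; ring_nf
    have hdiv : (a : Int) = (2 : Int) ^ k * ((a : Int) / ((2 : Int) ^ k)) + (a : Int) % ((2 : Int) ^ k) :=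
      (Int.mul_ediv_add_emod _ _).symm
    have key : n % ((2 : Int) ^ k) = ((2 : Int) ^ k - 1 - (a : Int) % ((2 : Int) ^ k)) := by
      have hn2 : n = ((2 : Int) ^ k - 1 - (a : Int) % ((2 : Int) ^ k))
          + (2 : Int) ^ k * (-(((a : Int)) / ((2 : Int) ^ k)) - 1) := by
        linear_combination han - hdiv
      rw [hn2, Int.add_mul_emod_self_left]
      have h0 : 0 ≤ (a : Int) % ((2 : Int) ^ k) := Int.emod_nonneg _ (by positivity)
      have h1 : (a : Int) % ((2 : Int) ^ k) < (2 : Int) ^ k := Int.emod_lt_of_pos _ hp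
      exact Int.emod_eq_of_lt (by omega) (by omega)
    rw [key]
    omega

theorem emod_split (n p : Int) (hp : 0 < p) :
    n % (2 * p) = n % p + ((n / p) % 2) * p := by
  have e1 : p * (n / p) + n % p = n := Int.mul_ediv_add_emod n p
  have e2 : 2 * ((n / p) / 2) + (n / p) % 2 = n / p := Int.mul_ediv_add_emod (n / p) 2
  have h1 : n = (n % p + ((n / p) % 2) * p) + (2 * p) * ((n / p) / 2) := by
    linear_combination -e1 - p * e2
  have hr0 : 0 ≤ n % p := Int.emod_nonneg _ (by omega)
  have hr1 : n % p < p := Int.emod_lt_of_pos _ hp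
  have hq : (n / p) % 2 = 0 ∨ (n / p) % 2 = 1 := Int.emod_two_eq_zero_or_one _
  conv_lhs => rw [h1]
  rw [Int.add_mul_emod_self_left]
  refine Int.emod_eq_of_lt ?_ ?_ <;> rcases hq with h | h <;> rw [h] <;>
    simp only [zero_mul, one_mul, add_zero] <;> linarith

theorem band_step (n : Int) (b : Nat) :
    PySem.Int.band n ((2 : Int) ^ (b + 1) - 1)
      = PySem.Int.band n ((2 : Int) ^ b - 1) + PySem.Int.band (n >>> b) 1 * 2 ^ b := by
  rw [band_two_pow, band_two_pow, PySem.Int.band_one,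
      PySem.Int.mod_eq_emod_of_pos (by norm_num), Int.shiftRight_eq_div_pow]
  have hcast : ((2 ^ b : Nat) : Int) = (2 : Int) ^ b := by push_cast; ring
  rw [hcast, show ((2 : Int) ^ (b + 1)) = 2 * 2 ^ b by ring]
  exact emod_split n ((2 : Int) ^ b) (by positivity)

theorem Ssum_step (nums : List Int) (b : Nat) :
    Ssum nums (b + 1)
      = Ssum nums b + (nums.map (fun n : Int => PySem.Int.band (n >>> b) 1)).sum * 2 ^ b := by
  unfold Ssum
  induction nums with
  | nil => simp
  | cons x xs ih =>
    simp only [List.map_cons, List.sum_cons]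
    rw [band_step x b, ih]
    ring

theorem cnt_getD (nums : List Int) (b : Nat) (hb : b < 60) :
    (cntList nums).getD b 0 = (nums.map (fun n : Int => PySem.Int.band (n >>> b) 1)).sum := by
  unfold cntList
  rw [List.getD_eq_getElem?_getD, List.getElem?_map, List.getElem?_range hb]
  simp [foldl_add_eq]

theorem step_eq (nums : List Int) (orv : Int) (k : Nat) (hk : k < 60) :
    stepB nums (orv, Ssum nums k) k = (stepA nums orv k, Ssum nums (k + 1)) := by
  have hrun : Ssum nums k + ((cntList nums).getD k 0 <<< k) = Ssum nums (k + 1) := by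
    rw [cnt_getD nums k hk, Int.shiftLeft_eq, Ssum_step]
  have hmask : ∀ num : Int,
      PySem.Int.band num (((1 : Int) <<< (k + 1)) - 1)
        = PySem.Int.band num ((2 : Int) ^ (k + 1) - 1) := fun num => by
    rw [Int.shiftLeft_eq, one_mul]
  have hsum : nums.foldl
      (fun s num => s + PySem.Int.band num (((1 : Int) <<< (k + 1)) - 1)) 0
      = Ssum nums (k + 1) := by
    simp only [hmask]
    rw [foldl_add_eq, zero_add]
    rfl
  unfold stepA stepB
  rw [hrun, hsum]

theorem invariant (nums : List Int) (k : Nat) (hk : k ≤ 60) :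
    (List.range k).foldl (stepB nums) ((0 : Int), (0 : Int))
      = ((List.range k).foldl (stepA nums) 0, Ssum nums k) := by
  induction k with
  | zero => simp [Ssum, PySem.Int.band_zero]
  | succ k ih =>
    have hk' : k ≤ 60 := by omega
    rw [List.range_succ, List.foldl_append, List.foldl_append, ih hk']
    simp only [List.foldl_cons, List.foldl_nil]
    exact step_eq nums _ k (by omega)

-- ===== VERDICT (by name: the statement is the Claim_ definition above) =====
theorem subsequenceSumOr_spec : Claim_equal_subsequenceSumOr := by
  intro nums _
  show subsequenceSumOr nums = subsequenceSumOr_alt nums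
  have hA : subsequenceSumOr nums = (List.range 60).foldl (stepA nums) 0 := rfl
  have hB : subsequenceSumOr_alt nums
      = ((List.range 60).foldl (stepB nums) ((0 : Int), (0 : Int))).1 := rfl
  rw [hA, hB, invariant nums 60 (by omega)]
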